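-- pv_equiv track=rewrite | github.com/Jaryang/cappyfoodies | data/clean.py | relabel
-- ===== SOURCE A (Python) =====
-- cate_dct = {
--     'Bakeries' : ["Bakeries", "Piadina", "Pretzels", "Bagels", 'Patisserie/Cake Shop'],
--     'Alcohol' : ['Cocktail Bars','Brewpubs','Beer Bar','Whiskey Bars','Wine Bars','Beer, Wine & Spirits', 'Pubs', 'Bars','Dive Bars', \
--                  'Sports Bars','Beer', 'Wine & Spirits', 'Breweries', 'Cideries', 'Distilleries', 'Meaderies', 'Wineries', 'Wine Tasting Room'],
--     'Coffee_Tea' : ['Coffee & Tea','Coffee Roasteries', 'Tea Rooms,Bubble Tea', 'Cafes'],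
--     'Dessert' : ['Creperies','Candy Stores','Pancakes','Desserts','Chimney Cakes','Cupcakes','Custom Cakes','Donuts', 'Gelato', 'Honey', \
--                  'Ice Cream & Frozen Yogurt', 'Milkshake Bars', 'Shaved Ice', 'Shaved Snow', 'Candy Stores', 'Chocolatiers & Shops', 'Macarons'],
--     'Grocery' : ['Imported Food', 'International Grocery','Organic Stores','Fruits & Veggies','Health Markets','Convenience Stores','Farmers Market','CSA'],
--     'Beverage' : ['Juice Bars & Smoothies', 'Acai Bowls','Kombucha', 'Water Stores', 'Bubble Tea'],
--     'Fast_Food': ['Cheesesteaks','Burgers', 'Chicken Wings','Fast Food','Pizza', 'Hot Dogs', 'Sandwiches'],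
--     'Specialty_Store' : ['Cheese Shops','Herbs & Spices','Olive Oil','Pasta Shops','Popcorn Shops','Tofu Shops','Empanadas'],
--     'Meat_Shop' : ['Seafood Markets', 'Butcher', 'Smokehouse'],
--     'Regional' : ['Cuban', 'Venezuelan','Honduran','Vietnamese','Afghan','African','Bulgarian','Colombian', 'Japanese', 'Laotian', 'Latin American', \
--                   'Mediterranean', 'Mexican', 'Middle Eastern', 'Modern European', 'New Mexican Cuisine', 'Pakistani','Pan Asian', 'Polish', 'Puerto Rican', 'Scottish', \
--                   'Southern','Thai', 'Turkish','Chinese', 'Czech','Filipino','French','Greek', 'Hawaiian', 'Indian', 'Irish', 'Korean','German','Italian',\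
--                   'Japanese','Czech','American (Traditional)','American (New)','Asian Fusion', 'Cajun/Creole','Cantonese','Caribbean']
--     }
--
-- Not_Food = ['Kids Activities', 'Music Venues', 'Arcades','Venues & Event Spaces','Party & Event Planning','Comedy Clubs', \
--             'Street Vendors','Bookstores','Lounges', 'Vape Shops','Gift Shops']
--
-- Sub_Category = ['Halal','Noodles','Tacos', 'Sushi Bars','Soul Food', 'Dim Sum', 'Buffets', 'Cafeteria', 'Food Trucks','Gluten-Free','Caterers','Vegan','Diners']
--
-- def relabel(cat_lst):
--
--     new_label = []
--     for label in cat_lst: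
--         if label not in Not_Food and label not in Sub_Category:
--             new_label.append(label)
--
--     for i, label in enumerate(new_label):
--         for category, lst in cate_dct.items():
--             if label in lst:
--                 new_label[i] = category
--
--     return list(set(new_label))
-- ===== SOURCE B (Python) =====
-- # B: a precomputed member->category REVERSE table (written out flat, last
-- # duplicate wins, matching A's no-break loop) and one pass that filters via a
-- # SKIP set and relabels through REVERSE, collecting distinct results.
--
-- REVERSE = {
--     'Bakeries': 'Bakeries',
--     'Piadina': 'Bakeries',
--     'Pretzels': 'Bakeries',
--     'Bagels': 'Bakeries',
--     'Patisserie/Cake Shop': 'Bakeries',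
--     'Cocktail Bars': 'Alcohol',
--     'Brewpubs': 'Alcohol',
--     'Beer Bar': 'Alcohol',
--     'Whiskey Bars': 'Alcohol',
--     'Wine Bars': 'Alcohol',
--     'Beer, Wine & Spirits': 'Alcohol',
--     'Pubs': 'Alcohol',
--     'Bars': 'Alcohol',
--     'Dive Bars': 'Alcohol',
--     'Sports Bars': 'Alcohol',
--     'Beer': 'Alcohol',
--     'Wine & Spirits': 'Alcohol',
--     'Breweries': 'Alcohol',
--     'Cideries': 'Alcohol',
--     'Distilleries': 'Alcohol',
--     'Meaderies': 'Alcohol',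
--     'Wineries': 'Alcohol',
--     'Wine Tasting Room': 'Alcohol',
--     'Coffee & Tea': 'Coffee_Tea',
--     'Coffee Roasteries': 'Coffee_Tea',
--     'Tea Rooms,Bubble Tea': 'Coffee_Tea',
--     'Cafes': 'Coffee_Tea',
--     'Creperies': 'Dessert',
--     'Candy Stores': 'Dessert',
--     'Pancakes': 'Dessert',
--     'Desserts': 'Dessert',
--     'Chimney Cakes': 'Dessert',
--     'Cupcakes': 'Dessert',
--     'Custom Cakes': 'Dessert',
--     'Donuts': 'Dessert',
--     'Gelato': 'Dessert',
--     'Honey': 'Dessert',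
--     'Ice Cream & Frozen Yogurt': 'Dessert',
--     'Milkshake Bars': 'Dessert',
--     'Shaved Ice': 'Dessert',
--     'Shaved Snow': 'Dessert',
--     'Candy Stores': 'Dessert',
--     'Chocolatiers & Shops': 'Dessert',
--     'Macarons': 'Dessert',
--     'Imported Food': 'Grocery',
--     'International Grocery': 'Grocery',
--     'Organic Stores': 'Grocery',
--     'Fruits & Veggies': 'Grocery',
--     'Health Markets': 'Grocery',
--     'Convenience Stores': 'Grocery',
--     'Farmers Market': 'Grocery',
--     'CSA': 'Grocery',
--     'Juice Bars & Smoothies': 'Beverage',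
--     'Acai Bowls': 'Beverage',
--     'Kombucha': 'Beverage',
--     'Water Stores': 'Beverage',
--     'Bubble Tea': 'Beverage',
--     'Cheesesteaks': 'Fast_Food',
--     'Burgers': 'Fast_Food',
--     'Chicken Wings': 'Fast_Food',
--     'Fast Food': 'Fast_Food',
--     'Pizza': 'Fast_Food',
--     'Hot Dogs': 'Fast_Food',
--     'Sandwiches': 'Fast_Food',
--     'Cheese Shops': 'Specialty_Store',
--     'Herbs & Spices': 'Specialty_Store',
--     'Olive Oil': 'Specialty_Store',
--     'Pasta Shops': 'Specialty_Store',
--     'Popcorn Shops': 'Specialty_Store',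
--     'Tofu Shops': 'Specialty_Store',
--     'Empanadas': 'Specialty_Store',
--     'Seafood Markets': 'Meat_Shop',
--     'Butcher': 'Meat_Shop',
--     'Smokehouse': 'Meat_Shop',
--     'Cuban': 'Regional',
--     'Venezuelan': 'Regional',
--     'Honduran': 'Regional',
--     'Vietnamese': 'Regional',
--     'Afghan': 'Regional',
--     'African': 'Regional',
--     'Bulgarian': 'Regional',
--     'Colombian': 'Regional',
--     'Japanese': 'Regional',
--     'Laotian': 'Regional',
--     'Latin American': 'Regional',
--     'Mediterranean': 'Regional',
--     'Mexican': 'Regional',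
--     'Middle Eastern': 'Regional',
--     'Modern European': 'Regional',
--     'New Mexican Cuisine': 'Regional',
--     'Pakistani': 'Regional',
--     'Pan Asian': 'Regional',
--     'Polish': 'Regional',
--     'Puerto Rican': 'Regional',
--     'Scottish': 'Regional',
--     'Southern': 'Regional',
--     'Thai': 'Regional',
--     'Turkish': 'Regional',
--     'Chinese': 'Regional',
--     'Czech': 'Regional',
--     'Filipino': 'Regional',
--     'French': 'Regional',
--     'Greek': 'Regional',
--     'Hawaiian': 'Regional',
--     'Indian': 'Regional',
--     'Irish': 'Regional',
--     'Korean': 'Regional',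
--     'German': 'Regional',
--     'Italian': 'Regional',
--     'Japanese': 'Regional',
--     'Czech': 'Regional',
--     'American (Traditional)': 'Regional',
--     'American (New)': 'Regional',
--     'Asian Fusion': 'Regional',
--     'Cajun/Creole': 'Regional',
--     'Cantonese': 'Regional',
--     'Caribbean': 'Regional'
-- }
--
-- SKIP = frozenset(['Kids Activities', 'Music Venues', 'Arcades', 'Venues & Event Spaces', 'Party & Event Planning', 'Comedy Clubs', 'Street Vendors', 'Bookstores', 'Lounges', 'Vape Shops', 'Gift Shops', 'Halal', 'Noodles', 'Tacos', 'Sushi Bars', 'Soul Food', 'Dim Sum', 'Buffets', 'Cafeteria', 'Food Trucks', 'Gluten-Free', 'Caterers', 'Vegan', 'Diners'])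
--
--
-- def relabel(cat_lst):
--     out = set()
--     for label in cat_lst:
--         if label not in SKIP:
--             out.add(REVERSE.get(label, label))
--     return list(out)
-- ===== Notes on version B (the rewrite author's own statement) =====
-- stated objective: faster
-- what changed: Replaces A's three staged passes (filter loop, enumerate loop with an inner scan over every category list and index assignment, final list(set(...))) by a flat precomputed member-to-category REVERSE table (written out once, last duplicate wins like A's no-break loop) plus a single accumulating pass over cat_lst that skips via a frozenset and adds the relabelled value into a result set.
import Mathlib
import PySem

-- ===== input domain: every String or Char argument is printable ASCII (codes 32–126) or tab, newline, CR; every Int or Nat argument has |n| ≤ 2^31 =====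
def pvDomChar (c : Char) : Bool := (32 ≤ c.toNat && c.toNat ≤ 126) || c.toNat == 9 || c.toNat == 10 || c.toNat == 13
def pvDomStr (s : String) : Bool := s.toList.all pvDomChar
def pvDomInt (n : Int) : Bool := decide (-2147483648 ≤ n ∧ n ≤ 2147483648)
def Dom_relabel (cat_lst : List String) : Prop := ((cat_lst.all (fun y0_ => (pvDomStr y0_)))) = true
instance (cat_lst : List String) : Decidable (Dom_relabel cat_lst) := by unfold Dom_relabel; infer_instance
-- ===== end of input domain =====

-- B replaces A's per-label rescan of every category list (and the separate
-- filter / index-assignment loops) by a flat precomputed member→category table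
-- (last duplicate wins, = A's no-break loop) and one accumulating pass.
-- Python's list(set(…)) hash iteration order is not modelled (results compared as sets).

-- ===== PORT A =====
-- A's module constants, verbatim
def cateDct : PySem.Dict String (List String) := PySem.Dict.ofList [
  ("Bakeries", ["Bakeries", "Piadina", "Pretzels", "Bagels", "Patisserie/Cake Shop"]),
  ("Alcohol", ["Cocktail Bars","Brewpubs","Beer Bar","Whiskey Bars","Wine Bars","Beer, Wine & Spirits", "Pubs", "Bars","Dive Bars",
               "Sports Bars","Beer", "Wine & Spirits", "Breweries", "Cideries", "Distilleries", "Meaderies", "Wineries", "Wine Tasting Room"]),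
  ("Coffee_Tea", ["Coffee & Tea","Coffee Roasteries", "Tea Rooms,Bubble Tea", "Cafes"]),
  ("Dessert", ["Creperies","Candy Stores","Pancakes","Desserts","Chimney Cakes","Cupcakes","Custom Cakes","Donuts", "Gelato", "Honey",
               "Ice Cream & Frozen Yogurt", "Milkshake Bars", "Shaved Ice", "Shaved Snow", "Candy Stores", "Chocolatiers & Shops", "Macarons"]),
  ("Grocery", ["Imported Food", "International Grocery","Organic Stores","Fruits & Veggies","Health Markets","Convenience Stores","Farmers Market","CSA"]),
  ("Beverage", ["Juice Bars & Smoothies", "Acai Bowls","Kombucha", "Water Stores", "Bubble Tea"]),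
  ("Fast_Food", ["Cheesesteaks","Burgers", "Chicken Wings","Fast Food","Pizza", "Hot Dogs", "Sandwiches"]),
  ("Specialty_Store", ["Cheese Shops","Herbs & Spices","Olive Oil","Pasta Shops","Popcorn Shops","Tofu Shops","Empanadas"]),
  ("Meat_Shop", ["Seafood Markets", "Butcher", "Smokehouse"]),
  ("Regional", ["Cuban", "Venezuelan","Honduran","Vietnamese","Afghan","African","Bulgarian","Colombian", "Japanese", "Laotian", "Latin American",
                "Mediterranean", "Mexican", "Middle Eastern", "Modern European", "New Mexican Cuisine", "Pakistani","Pan Asian", "Polish", "Puerto Rican", "Scottish",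
                "Southern","Thai", "Turkish","Chinese", "Czech","Filipino","French","Greek", "Hawaiian", "Indian", "Irish", "Korean","German","Italian",
                "Japanese","Czech","American (Traditional)","American (New)","Asian Fusion", "Cajun/Creole","Cantonese","Caribbean"])]

def notFood : List String := ["Kids Activities", "Music Venues", "Arcades","Venues & Event Spaces","Party & Event Planning","Comedy Clubs",
  "Street Vendors","Bookstores","Lounges", "Vape Shops","Gift Shops"]

def subCategory : List String := ["Halal","Noodles","Tacos", "Sushi Bars","Soul Food", "Dim Sum", "Buffets", "Cafeteria", "Food Trucks","Gluten-Free","Caterers","Vegan","Diners"]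

-- Python `for i, label in enumerate(new_label)` reads the live list, but step i only
-- writes index i, which is fetched before the write, so the snapshot enumerate is exact.
def relabel (cat_lst : List String) : List String :=
  let new_label := cat_lst.foldl
    (fun acc label => if !(notFood.contains label) && !(subCategory.contains label)
                      then acc ++ [label] else acc) []
  let relabeled := (PySem.List.enumerate new_label 0).foldl
    (fun acc p => cateDct.items.foldl
      (fun acc2 q => if q.2.contains p.2 then PySem.List.pySetD acc2 p.1 q.1 else acc2) acc)
    new_label
  PySem.Set.ofList relabeled

-- ===== PORT B =====
-- Source B's REVERSE table, verbatim (a dict literal; duplicate keys keep first position, last value)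
def reverseTbl : PySem.Dict String String := PySem.Dict.ofList [
  ("Bakeries", "Bakeries"),
  ("Piadina", "Bakeries"),
  ("Pretzels", "Bakeries"),
  ("Bagels", "Bakeries"),
  ("Patisserie/Cake Shop", "Bakeries"),
  ("Cocktail Bars", "Alcohol"),
  ("Brewpubs", "Alcohol"),
  ("Beer Bar", "Alcohol"),
  ("Whiskey Bars", "Alcohol"),
  ("Wine Bars", "Alcohol"),
  ("Beer, Wine & Spirits", "Alcohol"),
  ("Pubs", "Alcohol"),
  ("Bars", "Alcohol"),
  ("Dive Bars", "Alcohol"),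
  ("Sports Bars", "Alcohol"),
  ("Beer", "Alcohol"),
  ("Wine & Spirits", "Alcohol"),
  ("Breweries", "Alcohol"),
  ("Cideries", "Alcohol"),
  ("Distilleries", "Alcohol"),
  ("Meaderies", "Alcohol"),
  ("Wineries", "Alcohol"),
  ("Wine Tasting Room", "Alcohol"),
  ("Coffee & Tea", "Coffee_Tea"),
  ("Coffee Roasteries", "Coffee_Tea"),
  ("Tea Rooms,Bubble Tea", "Coffee_Tea"),
  ("Cafes", "Coffee_Tea"),
  ("Creperies", "Dessert"),
  ("Candy Stores", "Dessert"),
  ("Pancakes", "Dessert"),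
  ("Desserts", "Dessert"),
  ("Chimney Cakes", "Dessert"),
  ("Cupcakes", "Dessert"),
  ("Custom Cakes", "Dessert"),
  ("Donuts", "Dessert"),
  ("Gelato", "Dessert"),
  ("Honey", "Dessert"),
  ("Ice Cream & Frozen Yogurt", "Dessert"),
  ("Milkshake Bars", "Dessert"),
  ("Shaved Ice", "Dessert"),
  ("Shaved Snow", "Dessert"),
  ("Candy Stores", "Dessert"),
  ("Chocolatiers & Shops", "Dessert"),
  ("Macarons", "Dessert"),
  ("Imported Food", "Grocery"),
  ("International Grocery", "Grocery"),
  ("Organic Stores", "Grocery"),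
  ("Fruits & Veggies", "Grocery"),
  ("Health Markets", "Grocery"),
  ("Convenience Stores", "Grocery"),
  ("Farmers Market", "Grocery"),
  ("CSA", "Grocery"),
  ("Juice Bars & Smoothies", "Beverage"),
  ("Acai Bowls", "Beverage"),
  ("Kombucha", "Beverage"),
  ("Water Stores", "Beverage"),
  ("Bubble Tea", "Beverage"),
  ("Cheesesteaks", "Fast_Food"),
  ("Burgers", "Fast_Food"),
  ("Chicken Wings", "Fast_Food"),
  ("Fast Food", "Fast_Food"),
  ("Pizza", "Fast_Food"),
  ("Hot Dogs", "Fast_Food"),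
  ("Sandwiches", "Fast_Food"),
  ("Cheese Shops", "Specialty_Store"),
  ("Herbs & Spices", "Specialty_Store"),
  ("Olive Oil", "Specialty_Store"),
  ("Pasta Shops", "Specialty_Store"),
  ("Popcorn Shops", "Specialty_Store"),
  ("Tofu Shops", "Specialty_Store"),
  ("Empanadas", "Specialty_Store"),
  ("Seafood Markets", "Meat_Shop"),
  ("Butcher", "Meat_Shop"),
  ("Smokehouse", "Meat_Shop"),
  ("Cuban", "Regional"),
  ("Venezuelan", "Regional"),
  ("Honduran", "Regional"),
  ("Vietnamese", "Regional"),
  ("Afghan", "Regional"),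
  ("African", "Regional"),
  ("Bulgarian", "Regional"),
  ("Colombian", "Regional"),
  ("Japanese", "Regional"),
  ("Laotian", "Regional"),
  ("Latin American", "Regional"),
  ("Mediterranean", "Regional"),
  ("Mexican", "Regional"),
  ("Middle Eastern", "Regional"),
  ("Modern European", "Regional"),
  ("New Mexican Cuisine", "Regional"),
  ("Pakistani", "Regional"),
  ("Pan Asian", "Regional"),
  ("Polish", "Regional"),
  ("Puerto Rican", "Regional"),
  ("Scottish", "Regional"),
  ("Southern", "Regional"),
  ("Thai", "Regional"),
  ("Turkish", "Regional"),
  ("Chinese", "Regional"),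
  ("Czech", "Regional"),
  ("Filipino", "Regional"),
  ("French", "Regional"),
  ("Greek", "Regional"),
  ("Hawaiian", "Regional"),
  ("Indian", "Regional"),
  ("Irish", "Regional"),
  ("Korean", "Regional"),
  ("German", "Regional"),
  ("Italian", "Regional"),
  ("Japanese", "Regional"),
  ("Czech", "Regional"),
  ("American (Traditional)", "Regional"),
  ("American (New)", "Regional"),
  ("Asian Fusion", "Regional"),
  ("Cajun/Creole", "Regional"),
  ("Cantonese", "Regional"),
  ("Caribbean", "Regional")]

-- Source B's SKIP frozenset, verbatim
def skipTbl : PySem.Set String := PySem.Set.ofList ["Kids Activities", "Music Venues", "Arcades", "Venues & Event Spaces", "Party & Event Planning", "Comedy Clubs", "Street Vendors", "Bookstores", "Lounges", "Vape Shops", "Gift Shops", "Halal", "Noodles", "Tacos", "Sushi Bars", "Soul Food", "Dim Sum", "Buffets", "Cafeteria", "Food Trucks", "Gluten-Free", "Caterers", "Vegan", "Diners"]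

def relabel_alt (cat_lst : List String) : List String :=
  cat_lst.foldl
    (fun out label => if !(PySem.Set.contains skipTbl label)
                      then PySem.Set.add out (reverseTbl.getD label label) else out)
    PySem.Set.empty

-- ===== PRECONDITION & SPEC =====
def Spec_relabel (cat_lst : List String) (out : List String) : Prop := out = relabel_alt cat_lst
instance (cat_lst : List String) (out : List String) : Decidable (Spec_relabel cat_lst out) := by unfold Spec_relabel; infer_instance

-- ===== CLAIM (what is proved, stated in full; the proofs are below) =====
def Claim_equal_relabel : Prop := ∀ (cat_lst : List String), Dom_relabel cat_lst → Spec_relabel cat_lst (relabel cat_lst)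

-- ===== LEMMAS AND PROOFS =====

-- last-wins scan over the category lists, with running value `cur`
def lastWins (ps : List (String × List String)) (l cur : String) : String :=
  ps.foldl (fun c q => if q.2.contains l then q.1 else c) cur

-- inserting every member of `mem` with value `cat` then looking up `l`
theorem getD_insert_members (mem : List String) (cat l dflt : String)
    (d : PySem.Dict String String) :
    (mem.foldl (fun d2 m => d2.insert m cat) d).getD l dflt
      = if mem.contains l then cat else d.getD l dflt := by
  induction mem generalizing d with
  | nil => simp
  | cons m rest ih =>
    simp only [List.foldl_cons, ih, PySem.Dict.getD_insert]
    by_cases h2 : l ∈ rest <;> by_cases h : l = m <;> simp [h2, h]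

-- building a reverse dict over the pair list computes the last-wins category
theorem getD_build_rev (ps : List (String × List String)) (l dflt : String)
    (d : PySem.Dict String String) :
    (ps.foldl (fun d q => q.2.foldl (fun d2 m => d2.insert m q.1) d) d).getD l dflt
      = lastWins ps l (d.getD l dflt) := by
  induction ps generalizing d with
  | nil => rfl
  | cons q rest ih =>
    simp only [List.foldl_cons, lastWins, ih, getD_insert_members]

-- B's literal REVERSE table is exactly that reverse dict of cate_dct
set_option maxRecDepth 40000 in
theorem reverseTbl_eq_build :
    reverseTbl = cateDct.items.foldl
      (fun d q => q.2.foldl (fun d2 m => d2.insert m q.1) d) PySem.Dict.empty := by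
  rfl

theorem reverseTbl_getD (l : String) :
    reverseTbl.getD l l = lastWins cateDct.items l l := by
  rw [reverseTbl_eq_build, getD_build_rev]
  simp [PySem.Dict.getD_empty]

-- A side: the inner category scan writing new_label[k] equals one set to the last-wins value
theorem foldl_set_lastWins (ps : List (String × List String)) (acc : List String)
    (k : Nat) (l cur : String) (h : acc[k]? = some cur) :
    ps.foldl (fun a2 q => if q.2.contains l then a2.set k q.1 else a2) acc
      = acc.set k (lastWins ps l cur) := by
  induction ps generalizing acc cur with
  | nil =>
    obtain ⟨hk, hv⟩ := List.getElem?_eq_some_iff.mp h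
    simp only [List.foldl_nil, lastWins]
    exact hv ▸ (List.set_getElem_self hk).symm
  | cons q rest ih =>
    have hk : k < acc.length := (List.getElem?_eq_some_iff.mp h).1
    simp only [List.foldl_cons, lastWins]
    by_cases hc : q.2.contains l = true
    · have hm : l ∈ q.2 := by simpa [List.contains_eq_mem] using hc
      rw [if_pos hc, ih (acc.set k q.1) q.1 (by simp [List.getElem?_set_self hk])]
      simp [lastWins, List.set_set, hm]
    · have hm : l ∉ q.2 := by simpa [List.contains_eq_mem] using hc
      rw [if_neg hc, ih acc cur h]
      simp [lastWins, hm]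

-- A side: the enumerate loop rewrites every element to its last-wins relabel
theorem foldl_enumerate_relabel (xs front : List String) :
    (PySem.List.enumerate xs (front.length : Int)).foldl
      (fun acc p => cateDct.items.foldl
        (fun acc2 q => if q.2.contains p.2 then PySem.List.pySetD acc2 p.1 q.1 else acc2) acc)
      (front ++ xs)
      = front ++ xs.map (fun l => lastWins cateDct.items l l) := by
  induction xs generalizing front with
  | nil => simp [PySem.List.enumerate_nil]
  | cons x xs ih =>
    rw [PySem.List.enumerate_cons]
    simp only [List.foldl_cons]
    have hstep : cateDct.items.foldl
        (fun acc2 q => if q.2.contains x then PySem.List.pySetD acc2 (front.length : Int) q.1 else acc2)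
        (front ++ x :: xs)
        = (front ++ x :: xs).set front.length (lastWins cateDct.items x x) := by
      have hidx : (front ++ x :: xs)[front.length]? = some x := by
        simp
      simpa only [PySem.List.pySetD_natCast] using
        foldl_set_lastWins cateDct.items (front ++ x :: xs) front.length x x hidx
    rw [hstep]
    have hset : (front ++ x :: xs).set front.length (lastWins cateDct.items x x)
        = (front ++ [lastWins cateDct.items x x]) ++ xs := by
      rw [List.set_append_right _ _ (le_refl _)]
      simp
    rw [hset]
    have hlen : ((front.length : Int) + 1) = (((front ++ [lastWins cateDct.items x x]).length : Nat) : Int) := by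
      simp
    rw [hlen, ih]
    simp

-- B's literal SKIP set holds exactly Not_Food ++ Sub_Category
theorem skipTbl_eq : skipTbl = PySem.Set.ofList (notFood ++ subCategory) := by rfl

-- the two skip tests agree
theorem skip_eq (l : String) :
    (!(notFood.contains l) && !(subCategory.contains l))
      = !(PySem.Set.contains skipTbl l) := by
  rw [skipTbl_eq]
  have hmem : l ∈ PySem.Set.ofList (notFood ++ subCategory) ↔ (l ∈ notFood ∨ l ∈ subCategory) := by
    simp [PySem.Set.mem_ofList]
  by_cases hn : l ∈ notFood <;> by_cases hs : l ∈ subCategory <;>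
    simp [List.contains_eq_mem, PySem.Set.contains_eq_listContains, hmem, hn, hs]

-- B side: the conditional-add loop builds set((xs.filter p).map f)
theorem foldl_add_if (xs : List String) (p : String → Bool) (f : String → String) :
    xs.foldl (fun out l => if p l then PySem.Set.add out (f l) else out) PySem.Set.empty
      = PySem.Set.ofList ((xs.filter p).map f) := by
  rw [PySem.List.foldl_if_eq_foldl_filter, PySem.Set.ofList_eq_foldl, List.foldl_map]
  rfl

-- ===== VERDICT (by name: the statement is the Claim_ definition above) =====
set_option maxRecDepth 8192 in
theorem relabel_spec : Claim_equal_relabel := by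
  intro cat_lst _
  show relabel cat_lst = relabel_alt cat_lst
  simp only [relabel, relabel_alt]
  rw [PySem.List.foldl_append_if_eq_filter]
  have henum := foldl_enumerate_relabel (cat_lst.filter
      (fun label => !(notFood.contains label) && !(subCategory.contains label))) []
  simp only [List.length_nil, Nat.cast_zero, List.nil_append] at henum
  rw [List.nil_append, henum, foldl_add_if]
  congr 1
  rw [List.filter_congr (fun l _ => skip_eq l)]
  apply List.map_congr_left
  intro l _
  exact (reverseTbl_getD l).symm
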